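-- pv_equiv track=rewrite | github.com/vuquelam28/competitive-programming-topics | competitions/hsg_hanoi_thcs/2018-2019/p04_mini_square/solution.py | check
-- ===== SOURCE A (Python) =====
-- def get_sum(x1, y1, x2, y2, sum):
--     return sum[x2][y2] - sum[x1 - 1][y2] - sum[x2][y1 - 1] + sum[x1 - 1][y1 - 1]
--
-- def create_table(m, n, a, min_value):
--     s = [[0] * (n + 1) for _ in range(m + 1)]
--
--     for i in range(1, m + 1):
--         for j in range(1, n + 1):
--             s[i][j] = s[i - 1][j] + s[i][j - 1] - s[i - 1][j - 1] + (a[i][j] >= min_value)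
--
--     return s
--
-- def check(m, n, k, a, min_value):
--     sum = create_table(m, n, a, min_value)
--
--     for x1 in range(1, m - k + 2):
--         for y1 in range(1, n - k + 2):
--             x2, y2 = x1 + k - 1, y1 + k - 1
--
--             if get_sum(x1, y1, x2, y2, sum) == k * k:
--                 return True
--
--     return False
-- ===== SOURCE B (Python) =====
-- def check(m, n, k, a, min_value):
--     for x1 in range(1, m - k + 2):
--         for y1 in range(1, n - k + 2):
--             if all(a[x][y] >= min_value
--                    for x in range(x1, x1 + k)
--                    for y in range(y1, y1 + k)):
--                 return True
--     return False
-- ===== Notes on version B (the rewrite author's own statement) =====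
-- stated objective: simpler
-- what changed: B drops A's 2-D prefix-sum table and inclusion-exclusion window counting entirely and instead tests each k x k window directly with a single all(...) over its cells.
-- outside the precondition, e.g. on check(1, 1, -1, [[0, 0], [0, 5]], 5): A returns True, B returns True
import Mathlib
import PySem

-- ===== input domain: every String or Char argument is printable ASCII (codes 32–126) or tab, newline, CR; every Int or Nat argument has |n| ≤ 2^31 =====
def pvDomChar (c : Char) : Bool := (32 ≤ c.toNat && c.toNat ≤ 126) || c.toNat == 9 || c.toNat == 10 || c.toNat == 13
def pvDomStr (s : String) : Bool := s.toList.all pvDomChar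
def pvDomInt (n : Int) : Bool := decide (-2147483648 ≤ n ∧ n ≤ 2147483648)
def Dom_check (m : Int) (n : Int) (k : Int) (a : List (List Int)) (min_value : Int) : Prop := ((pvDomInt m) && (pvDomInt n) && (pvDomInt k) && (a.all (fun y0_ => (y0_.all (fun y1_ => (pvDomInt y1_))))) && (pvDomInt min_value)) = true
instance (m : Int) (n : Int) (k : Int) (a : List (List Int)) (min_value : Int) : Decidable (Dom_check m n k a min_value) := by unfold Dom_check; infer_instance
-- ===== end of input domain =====

-- B removes A's 2-D prefix-sum table and tests each k×k window directly with all(); simpler, not faster.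


-- ===== PORT A =====
-- s[i][j] : Python indexing, exact via PySem.List.pyGetD (default only reached where Python raises, excluded by Pre_)
def pvGet2 (s : List (List Int)) (i j : Int) : Int :=
  PySem.List.pyGetD (PySem.List.pyGetD s i []) j 0

-- s[i][j] = v : Python item assignment, exact via PySem.List.pySetD on the inputs admitted by Pre_
def pvSet2 (s : List (List Int)) (i j : Int) (v : Int) : List (List Int) :=
  PySem.List.pySetD s i (PySem.List.pySetD (PySem.List.pyGetD s i []) j v)

def get_sum (x1 y1 x2 y2 : Int) (sum : List (List Int)) : Int :=
  pvGet2 sum x2 y2 - pvGet2 sum (x1 - 1) y2 - pvGet2 sum x2 (y1 - 1) + pvGet2 sum (x1 - 1) (y1 - 1)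

-- loop body of create_table's inner 'for j' loop (named so the invariant lemmas can speak about it)
def pvStep (min_value : Int) (a : List (List Int)) (i : Int) (s : List (List Int)) (j : Int) : List (List Int) :=
  pvSet2 s i j (pvGet2 s (i - 1) j + pvGet2 s i (j - 1) - pvGet2 s (i - 1) (j - 1)
    + (if min_value ≤ pvGet2 a i j then 1 else 0))

-- one iteration of the outer 'for i' loop: the whole inner 'for j' loop
def pvRowLoop (min_value : Int) (a : List (List Int)) (n : Int) (s : List (List Int)) (i : Int) : List (List Int) :=
  (PySem.List.pyRange 1 (n + 1) 1).foldl (pvStep min_value a i) s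

def create_table (m n : Int) (a : List (List Int)) (min_value : Int) : List (List Int) :=
  (PySem.List.pyRange 1 (m + 1) 1).foldl (pvRowLoop min_value a n)
    ((PySem.List.pyRange 0 (m + 1) 1).map (fun _ => List.replicate (n + 1).toNat 0))

def check (m : Int) (n : Int) (k : Int) (a : List (List Int)) (min_value : Int) : Bool :=
  let sum := create_table m n a min_value
  (PySem.List.pyRange 1 (m - k + 2) 1).any fun x1 =>
    (PySem.List.pyRange 1 (n - k + 2) 1).any fun y1 =>
      get_sum x1 y1 (x1 + k - 1) (y1 + k - 1) sum == k * k

-- ===== PORT B =====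
def check_alt (m : Int) (n : Int) (k : Int) (a : List (List Int)) (min_value : Int) : Bool :=
  (PySem.List.pyRange 1 (m - k + 2) 1).any fun x1 =>
    (PySem.List.pyRange 1 (n - k + 2) 1).any fun y1 =>
      (PySem.List.pyRange x1 (x1 + k) 1).all fun x =>
        (PySem.List.pyRange y1 (y1 + k) 1).all fun y =>
          decide (min_value ≤ pvGet2 a x y)

-- ===== PRECONDITION & SPEC =====
-- Pre_ restricts k to the natural domain k ≥ 0 (for k < 0 A's negative window indices wrap or raise
-- IndexError depending on the sizes) and requires a to hold the (m+1)×(n+1) grid A reads whenever it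
-- reads it (m,n ≥ 1); otherwise A raises IndexError in create_table.
def Pre_check (m : Int) (n : Int) (k : Int) (a : List (List Int)) (min_value : Int) : Prop :=
  0 ≤ k ∧ (1 ≤ m → 1 ≤ n →
    (m + 1 ≤ (a.length : Int) ∧ ∀ row ∈ (a.drop 1).take m.toNat, n + 1 ≤ (row.length : Int)))
instance (m : Int) (n : Int) (k : Int) (a : List (List Int)) (min_value : Int) : Decidable (Pre_check m n k a min_value) := by unfold Pre_check; infer_instance

def pvWitness_check : Int × Int × Int × List (List Int) × Int :=
  (2, 2, 2, [[0, 0, 0], [0, 5, 5], [0, 5, 5]], 5)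

def Spec_check (m : Int) (n : Int) (k : Int) (a : List (List Int)) (min_value : Int) (out : Bool) : Prop := out = check_alt m n k a min_value
instance (m : Int) (n : Int) (k : Int) (a : List (List Int)) (min_value : Int) (out : Bool) : Decidable (Spec_check m n k a min_value out) := by unfold Spec_check; infer_instance

-- ===== CLAIM (what is proved, stated in full; the proofs are below) =====
def Claim_equal_check : Prop := ∀ (m : Int) (n : Int) (k : Int) (a : List (List Int)) (min_value : Int), Dom_check m n k a min_value → Pre_check m n k a min_value → Spec_check m n k a min_value (check m n k a min_value)

-- ===== LEMMAS AND PROOFS =====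

-- indicator of a good cell, and partial-sum abbreviations used by the invariant
def pvInd (min_value : Int) (a : List (List Int)) (x y : Int) : Int :=
  if min_value ≤ pvGet2 a x y then 1 else 0

def pvRowW (min_value : Int) (a : List (List Int)) (i j : Int) : Int :=
  ((PySem.List.pyRange 1 (j + 1) 1).map (fun y => pvInd min_value a i y)).sum

def pvW (min_value : Int) (a : List (List Int)) (i j : Int) : Int :=
  ((PySem.List.pyRange 1 (i + 1) 1).map (fun x => pvRowW min_value a x j)).sum

def pvWin (min_value : Int) (a : List (List Int)) (x1 y1 k : Int) : Int :=
  ((PySem.List.pyRange x1 (x1 + k) 1).map (fun x =>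
    ((PySem.List.pyRange y1 (y1 + k) 1).map (fun y => pvInd min_value a x y)).sum)).sum

-- table invariants
def pvGood (min_value : Int) (a : List (List Int)) (m n i : Int) (s : List (List Int)) : Prop :=
  s.length = (m + 1).toNat ∧ (∀ r ∈ s, r.length = (n + 1).toNat) ∧
  ∀ p q : Int, 0 ≤ p → p ≤ m → 0 ≤ q → q ≤ n →
    pvGet2 s p q = if p ≤ i then pvW min_value a p q else 0

def pvGoodRow (min_value : Int) (a : List (List Int)) (m n i j : Int) (s : List (List Int)) : Prop :=
  s.length = (m + 1).toNat ∧ (∀ r ∈ s, r.length = (n + 1).toNat) ∧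
  ∀ p q : Int, 0 ≤ p → p ≤ m → 0 ≤ q → q ≤ n →
    pvGet2 s p q = if p < i ∨ (p = i ∧ q ≤ j) then pvW min_value a p q else 0

theorem pvRowW_nonpos (mv : Int) (a : List (List Int)) (i j : Int) (hj : j ≤ 0) :
    pvRowW mv a i j = 0 := by
  rw [pvRowW, PySem.List.pyRange_one_eq_nil (by omega)]
  simp

theorem pvRowW_succ (mv : Int) (a : List (List Int)) (i j : Int) (hj : 1 ≤ j) :
    pvRowW mv a i j = pvRowW mv a i (j - 1) + pvInd mv a i j := by
  have h1 : j - 1 + 1 = j := by omega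
  rw [pvRowW, PySem.List.pyRange_one_succ_right (by omega : (1:Int) ≤ j), pvRowW, h1]
  simp

theorem pvW_nonpos (mv : Int) (a : List (List Int)) (i j : Int) (hi : i ≤ 0) :
    pvW mv a i j = 0 := by
  rw [pvW, PySem.List.pyRange_one_eq_nil (by omega)]
  simp

theorem pvW_succ (mv : Int) (a : List (List Int)) (i j : Int) (hi : 1 ≤ i) :
    pvW mv a i j = pvW mv a (i - 1) j + pvRowW mv a i j := by
  have h1 : i - 1 + 1 = i := by omega
  rw [pvW, PySem.List.pyRange_one_succ_right (by omega : (1:Int) ≤ i), pvW, h1]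
  simp

theorem pvW_col_nonpos (mv : Int) (a : List (List Int)) (i j : Int) (hj : j ≤ 0) :
    pvW mv a i j = 0 := by
  rw [pvW]
  apply List.sum_eq_zero
  intro x hx
  simp only [List.mem_map] at hx
  obtain ⟨y, -, rfl⟩ := hx
  exact pvRowW_nonpos mv a y j hj

theorem pvW_rect (mv : Int) (a : List (List Int)) (i j : Int) (hi : 1 ≤ i) (hj : 1 ≤ j) :
    pvW mv a i j = pvW mv a (i - 1) j + pvW mv a i (j - 1) - pvW mv a (i - 1) (j - 1)
      + pvInd mv a i j := by
  rw [pvW_succ mv a i j hi, pvW_succ mv a i (j - 1) hi, pvRowW_succ mv a i j hj]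
  ring

theorem pvGet2_set2 (s : List (List Int)) (i j p q v : Int)
    (hi : 0 ≤ i) (hj : 0 ≤ j) (hp : 0 ≤ p) (hq : 0 ≤ q)
    (hil : i.toNat < s.length) (hjl : j.toNat < (s.getD i.toNat []).length) :
    pvGet2 (pvSet2 s i j v) p q = if p = i ∧ q = j then v else pvGet2 s p q := by
  simp only [pvGet2, pvSet2,
    PySem.List.pyGetD_of_nonneg _ _ hi,
    PySem.List.pyGetD_of_nonneg _ _ hp, PySem.List.pyGetD_of_nonneg _ _ hq,
    PySem.List.pySetD_of_nonneg _ _ hi, PySem.List.pySetD_of_nonneg _ _ hj]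
  simp only [List.getD_eq_getElem?_getD]
  rw [List.getD_eq_getElem?_getD] at hjl
  by_cases hpi : p = i
  · subst hpi
    rw [List.getElem?_set_self hil]
    simp only [Option.getD_some]
    by_cases hqj : q = j
    · subst hqj
      rw [List.getElem?_set_self hjl]
      simp
    · have hne : j.toNat ≠ q.toNat := by omega
      rw [List.getElem?_set_ne hne]
      simp [hqj]
  · have hne : i.toNat ≠ p.toNat := by omega
    rw [List.getElem?_set_ne hne]
    simp [hpi]

theorem pv_table_init_eq (m n : Int) :
    ((PySem.List.pyRange 0 (m + 1) 1).map (fun _ => List.replicate (n + 1).toNat (0 : Int)))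
      = List.replicate (m + 1).toNat (List.replicate (n + 1).toNat 0) := by
  rw [List.map_const', PySem.List.length_pyRange_one]
  congr 1
  omega

theorem pvGood_init (mv : Int) (a : List (List Int)) (m n : Int) (hm : 0 ≤ m) (hn : 0 ≤ n) :
    pvGood mv a m n 0 (List.replicate (m + 1).toNat (List.replicate (n + 1).toNat 0)) := by
  refine ⟨by simp, by intro r hr; rw [List.eq_of_mem_replicate hr]; simp, ?_⟩
  intro p q hp hpm hq hqn
  have h1 : p.toNat < (m + 1).toNat := by omega
  have h2 : q.toNat < (n + 1).toNat := by omega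
  rw [pvGet2, PySem.List.pyGetD_of_nonneg _ _ hp, PySem.List.pyGetD_of_nonneg _ _ hq]
  simp only [List.getD_eq_getElem?_getD, List.getElem?_replicate, h1, if_true, Option.getD_some, h2]
  by_cases hp0 : p ≤ 0
  · rw [if_pos hp0, pvW_nonpos mv a p q hp0]
  · rw [if_neg hp0]

theorem pvGoodRow_start (mv : Int) (a : List (List Int)) (m n i : Int) (s : List (List Int))
    (h : pvGood mv a m n (i - 1) s) : pvGoodRow mv a m n i 0 s := by
  refine ⟨h.1, h.2.1, ?_⟩
  intro p q hp hpm hq hqn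
  rw [h.2.2 p q hp hpm hq hqn]
  by_cases h1 : p ≤ i - 1
  · rw [if_pos h1, if_pos (Or.inl (by omega))]
  · rw [if_neg h1]
    by_cases h2 : p = i ∧ q ≤ 0
    · rw [if_pos (Or.inr h2), pvW_col_nonpos mv a p q h2.2]
    · rw [if_neg (by omega)]

theorem pvGoodRow_step (mv : Int) (a : List (List Int)) (m n i j : Int) (s : List (List Int))
    (h : pvGoodRow mv a m n i (j - 1) s)
    (hi1 : 1 ≤ i) (him : i ≤ m) (hj1 : 1 ≤ j) (hjn : j ≤ n) :
    pvGoodRow mv a m n i j (pvStep mv a i s j) := by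
  obtain ⟨hlen, hrows, hval⟩ := h
  have hil : i.toNat < s.length := by rw [hlen]; omega
  have hget : s.getD i.toNat [] = s[i.toNat] := List.getD_eq_getElem s [] hil
  have hrowlen : (s.getD i.toNat []).length = (n + 1).toNat := by
    rw [hget]; exact hrows _ (List.getElem_mem hil)
  have hjl : j.toNat < (s.getD i.toNat []).length := by rw [hrowlen]; omega
  have hsetform : pvStep mv a i s j
      = s.set i.toNat ((s.getD i.toNat []).set j.toNat
          (pvGet2 s (i - 1) j + pvGet2 s i (j - 1) - pvGet2 s (i - 1) (j - 1)
            + (if mv ≤ pvGet2 a i j then 1 else 0))) := by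
    rw [pvStep, pvSet2, PySem.List.pyGetD_of_nonneg _ _ (by omega : (0:Int) ≤ i),
      PySem.List.pySetD_of_nonneg _ _ (by omega : (0:Int) ≤ j),
      PySem.List.pySetD_of_nonneg _ _ (by omega : (0:Int) ≤ i)]
  refine ⟨?_, ?_, ?_⟩
  · rw [hsetform, List.length_set, hlen]
  · intro r hr
    rw [hsetform] at hr
    rcases List.mem_or_eq_of_mem_set hr with hr' | rfl
    · exact hrows r hr'
    · rw [List.length_set]; exact hrowlen
  · intro p q hp hpm hq hqn
    rw [pvStep, pvGet2_set2 s i j p q _ (by omega) (by omega) hp hq hil hjl]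
    by_cases hpq : p = i ∧ q = j
    · obtain ⟨rfl, rfl⟩ := hpq
      rw [if_pos ⟨rfl, rfl⟩, if_pos (by omega : p < p ∨ (p = p ∧ q ≤ q))]
      rw [hval (p - 1) q (by omega) (by omega) hq hqn,
        hval p (q - 1) hp hpm (by omega) (by omega),
        hval (p - 1) (q - 1) (by omega) (by omega) (by omega) (by omega)]
      rw [if_pos (by omega : p - 1 < p ∨ (p - 1 = p ∧ q ≤ q - 1)),
        if_pos (by omega : p < p ∨ (p = p ∧ q - 1 ≤ q - 1)),
        if_pos (by omega : p - 1 < p ∨ (p - 1 = p ∧ q - 1 ≤ q - 1))]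
      have hind : (if mv ≤ pvGet2 a p q then (1:Int) else 0) = pvInd mv a p q := rfl
      rw [hind, pvW_rect mv a p q hi1 hj1]
    · rw [if_neg hpq, hval p q hp hpm hq hqn]
      by_cases hc : p < i ∨ (p = i ∧ q ≤ j - 1)
      · rw [if_pos hc, if_pos (by omega)]
      · rw [if_neg hc, if_neg (by omega)]

theorem pvGood_row (mv : Int) (a : List (List Int)) (m n i : Int) (s : List (List Int))
    (h : pvGood mv a m n (i - 1) s) (hi1 : 1 ≤ i) (him : i ≤ m) (hn : 0 ≤ n) :
    pvGood mv a m n i (pvRowLoop mv a n s i) := by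
  have key : ∀ t : Nat, (t : Int) ≤ n →
      pvGoodRow mv a m n i (t : Int)
        ((PySem.List.pyRange 1 ((t : Int) + 1) 1).foldl (pvStep mv a i) s) := by
    intro t
    induction t with
    | zero =>
      intro _
      rw [PySem.List.pyRange_one_eq_nil (by norm_num)]
      exact pvGoodRow_start mv a m n i s h
    | succ t ih =>
      intro hle
      have h1 : ((t + 1 : Nat) : Int) = (t : Int) + 1 := by push_cast; ring
      rw [h1, PySem.List.pyRange_one_succ_right (by omega : (1:Int) ≤ (t : Int) + 1),
        List.foldl_append, List.foldl_cons, List.foldl_nil]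
      have hprev : pvGoodRow mv a m n i ((t : Int) + 1 - 1)
          ((PySem.List.pyRange 1 ((t : Int) + 1) 1).foldl (pvStep mv a i) s) := by
        rw [show (t : Int) + 1 - 1 = (t : Int) by ring]
        exact ih (by omega)
      exact pvGoodRow_step mv a m n i ((t : Int) + 1) _ hprev hi1 him (by omega) (by push_cast at hle; omega)
  have hfin := key n.toNat (by omega)
  rw [show ((n.toNat : Int)) = n by omega] at hfin
  obtain ⟨h1, h2, h3⟩ := hfin
  refine ⟨h1, h2, ?_⟩
  intro p q hp hpm hq hqn
  rw [pvRowLoop, h3 p q hp hpm hq hqn]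
  by_cases hc : p ≤ i
  · rw [if_pos hc, if_pos (by omega)]
  · rw [if_neg hc, if_neg (by omega)]

theorem pvGood_table (mv : Int) (a : List (List Int)) (m n : Int) (hm : 0 ≤ m) (hn : 0 ≤ n) :
    pvGood mv a m n m (create_table m n a mv) := by
  have key : ∀ t : Nat, (t : Int) ≤ m →
      pvGood mv a m n (t : Int)
        ((PySem.List.pyRange 1 ((t : Int) + 1) 1).foldl (pvRowLoop mv a n)
          (List.replicate (m + 1).toNat (List.replicate (n + 1).toNat 0))) := by
    intro t
    induction t with
    | zero =>
      intro _
      rw [PySem.List.pyRange_one_eq_nil (by norm_num)]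
      exact pvGood_init mv a m n hm hn
    | succ t ih =>
      intro hle
      have h1 : ((t + 1 : Nat) : Int) = (t : Int) + 1 := by push_cast; ring
      rw [h1, PySem.List.pyRange_one_succ_right (by omega : (1:Int) ≤ (t : Int) + 1),
        List.foldl_append, List.foldl_cons, List.foldl_nil]
      have hprev : pvGood mv a m n ((t : Int) + 1 - 1)
          ((PySem.List.pyRange 1 ((t : Int) + 1) 1).foldl (pvRowLoop mv a n)
            (List.replicate (m + 1).toNat (List.replicate (n + 1).toNat 0))) := by
        rw [show (t : Int) + 1 - 1 = (t : Int) by ring]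
        exact ih (by omega)
      exact pvGood_row mv a m n ((t : Int) + 1) _ hprev (by omega) (by push_cast at hle; omega) hn
  have hfin := key m.toNat (by omega)
  rw [show ((m.toNat : Int)) = m by omega] at hfin
  simp only [create_table, pv_table_init_eq]
  exact hfin

theorem pvTable_eq (mv : Int) (a : List (List Int)) (m n p q : Int) (hm : 0 ≤ m) (hn : 0 ≤ n)
    (hp0 : 0 ≤ p) (hpm : p ≤ m) (hq0 : 0 ≤ q) (hqn : q ≤ n) :
    pvGet2 (create_table m n a mv) p q = pvW mv a p q := by
  rw [(pvGood_table mv a m n hm hn).2.2 p q hp0 hpm hq0 hqn, if_pos hpm]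

theorem pv_sum_map_sub (l : List Int) (f g : Int → Int) :
    (l.map f).sum - (l.map g).sum = (l.map (fun x => f x - g x)).sum := by
  induction l with
  | nil => simp
  | cons x l ih => simp only [List.map_cons, List.sum_cons]; omega

theorem pvW_colsplit (mv : Int) (a : List (List Int)) (x1 x2 j : Int)
    (hx1 : 1 ≤ x1) (hle : x1 ≤ x2 + 1) :
    pvW mv a x2 j - pvW mv a (x1 - 1) j
      = ((PySem.List.pyRange x1 (x2 + 1) 1).map (fun x => pvRowW mv a x j)).sum := by
  have h1 : x1 - 1 + 1 = x1 := by omega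
  rw [pvW, pvW, h1, PySem.List.pyRange_one_append 1 x1 (x2 + 1) (by omega) hle]
  simp

theorem pvRowW_split (mv : Int) (a : List (List Int)) (x y1 y2 : Int)
    (hy1 : 1 ≤ y1) (hle : y1 ≤ y2 + 1) :
    pvRowW mv a x y2 - pvRowW mv a x (y1 - 1)
      = ((PySem.List.pyRange y1 (y2 + 1) 1).map (fun y => pvInd mv a x y)).sum := by
  have h1 : y1 - 1 + 1 = y1 := by omega
  rw [pvRowW, pvRowW, h1, PySem.List.pyRange_one_append 1 y1 (y2 + 1) (by omega) hle]
  simp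

theorem pvWin_eq (mv : Int) (a : List (List Int)) (x1 y1 k : Int)
    (hk : 0 ≤ k) (hx : 1 ≤ x1) (hy : 1 ≤ y1) :
    pvW mv a (x1 + k - 1) (y1 + k - 1) - pvW mv a (x1 - 1) (y1 + k - 1)
      - pvW mv a (x1 + k - 1) (y1 - 1) + pvW mv a (x1 - 1) (y1 - 1)
      = pvWin mv a x1 y1 k := by
  have hx2 : x1 + k - 1 + 1 = x1 + k := by omega
  have hy2 : y1 + k - 1 + 1 = y1 + k := by omega
  have hA := pvW_colsplit mv a x1 (x1 + k - 1) (y1 + k - 1) hx (by omega)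
  have hB := pvW_colsplit mv a x1 (x1 + k - 1) (y1 - 1) hx (by omega)
  rw [hx2] at hA hB
  have : pvW mv a (x1 + k - 1) (y1 + k - 1) - pvW mv a (x1 - 1) (y1 + k - 1)
      - pvW mv a (x1 + k - 1) (y1 - 1) + pvW mv a (x1 - 1) (y1 - 1)
      = (pvW mv a (x1 + k - 1) (y1 + k - 1) - pvW mv a (x1 - 1) (y1 + k - 1))
        - (pvW mv a (x1 + k - 1) (y1 - 1) - pvW mv a (x1 - 1) (y1 - 1)) := by ring
  rw [this, hA, hB, pv_sum_map_sub, pvWin]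
  congr 1
  apply List.map_congr_left
  intro x hx'
  have := pvRowW_split mv a x y1 (y1 + k - 1) hy (by omega)
  rw [hy2] at this
  exact this

theorem pv_sum_le (l : List Int) (c : Int) (h : ∀ x ∈ l, x ≤ c) :
    l.sum ≤ c * l.length := by
  induction l with
  | nil => simp
  | cons x l ih =>
    have hx := h x (by simp)
    have hl := ih (fun y hy => h y (by simp [hy]))
    simp only [List.sum_cons, List.length_cons]
    push_cast
    nlinarith

theorem pv_sum_eq_iff (l : List Int) (c : Int) (h : ∀ x ∈ l, x ≤ c) :
    (l.sum = c * l.length ↔ ∀ x ∈ l, x = c) := by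
  induction l with
  | nil => simp
  | cons x l ih =>
    have hx := h x (by simp)
    have hl : ∀ y ∈ l, y ≤ c := fun y hy => h y (by simp [hy])
    have hle := pv_sum_le l c hl
    have hih := ih hl
    simp only [List.sum_cons, List.length_cons, List.mem_cons]
    push_cast
    constructor
    · intro he
      have hxc : x = c := by nlinarith
      have hsum : l.sum = c * l.length := by push_cast at *; nlinarith
      intro y hy
      rcases hy with rfl | hy
      · exact hxc
      · exact (hih.mp hsum) y hy
    · intro hall
      have hxc : x = c := hall x (Or.inl rfl)
      have hsum : l.sum = c * l.length := hih.mpr (fun y hy => hall y (Or.inr hy))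
      push_cast at hsum
      nlinarith

theorem pvWin_iff (mv : Int) (a : List (List Int)) (x1 y1 k : Int) (hk : 0 ≤ k) :
    (pvWin mv a x1 y1 k = k * k ↔
      ((PySem.List.pyRange x1 (x1 + k) 1).all fun x =>
        (PySem.List.pyRange y1 (y1 + k) 1).all fun y =>
          decide (mv ≤ pvGet2 a x y)) = true) := by
  have hlen : ∀ c : Int, (PySem.List.pyRange c (c + k) 1).length = k.toNat := by
    intro c
    rw [PySem.List.length_pyRange_one]
    congr 1
    omega
  have hinner : ∀ x : Int,
      ((PySem.List.pyRange y1 (y1 + k) 1).map (fun y => pvInd mv a x y)).sum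
        = ((PySem.List.pyRange y1 (y1 + k) 1).countP (fun y => decide (mv ≤ pvGet2 a x y)) : Int) := by
    intro x
    rw [← PySem.List.sum_map_ite_one_zero (fun y => decide (mv ≤ pvGet2 a x y))]
    apply congrArg
    apply List.map_congr_left
    intro y _hy
    simp [pvInd]
  have hbound : ∀ S ∈ (PySem.List.pyRange x1 (x1 + k) 1).map (fun x =>
      ((PySem.List.pyRange y1 (y1 + k) 1).map (fun y => pvInd mv a x y)).sum), S ≤ k := by
    intro S hS
    simp only [List.mem_map] at hS
    obtain ⟨x, -, rfl⟩ := hS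
    rw [hinner x]
    have := List.countP_le_length (l := PySem.List.pyRange y1 (y1 + k) 1)
      (p := fun y => decide (mv ≤ pvGet2 a x y))
    calc ((PySem.List.pyRange y1 (y1 + k) 1).countP (fun y => decide (mv ≤ pvGet2 a x y)) : Int)
        ≤ ((PySem.List.pyRange y1 (y1 + k) 1).length : Int) := by exact_mod_cast this
      _ = k := by rw [hlen y1]; omega
  have hkk : k * k = k * (((PySem.List.pyRange x1 (x1 + k) 1).map (fun x =>
      ((PySem.List.pyRange y1 (y1 + k) 1).map (fun y => pvInd mv a x y)).sum)).length : Int) := by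
    rw [List.length_map, hlen x1]
    congr 1
    omega
  rw [pvWin, hkk, pv_sum_eq_iff _ k hbound]
  simp only [List.all_eq_true, List.mem_map, forall_exists_index, and_imp]
  constructor
  · intro h x hx
    have hx' := h _ x hx rfl
    rw [hinner x] at hx'
    have hcnt : (PySem.List.pyRange y1 (y1 + k) 1).countP (fun y => decide (mv ≤ pvGet2 a x y))
        = (PySem.List.pyRange y1 (y1 + k) 1).length := by
      rw [hlen y1]; omega
    have := List.countP_eq_length.mp hcnt
    intro y hy
    exact this y hy
  · intro h S x hx rfl
    rw [hinner x]
    have hcnt : (PySem.List.pyRange y1 (y1 + k) 1).countP (fun y => decide (mv ≤ pvGet2 a x y))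
        = (PySem.List.pyRange y1 (y1 + k) 1).length :=
      List.countP_eq_length.mpr (fun y hy => h x hx y hy)
    rw [hcnt, hlen y1]
    omega


-- ===== VERDICT (by name: the statement is the Claim_ definition above) =====
theorem check_spec : Claim_equal_check := by
  intro m n k a min_value _hdom hpre
  obtain ⟨hk, -⟩ := hpre
  show check m n k a min_value = check_alt m n k a min_value
  unfold check check_alt
  apply PySem.List.any_congr_mem
  intro x1 hx1
  apply PySem.List.any_congr_mem
  intro y1 hy1
  rw [PySem.List.mem_pyRange_one] at hx1 hy1
  have hm : 0 ≤ m := by omega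
  have hn : 0 ≤ n := by omega
  rw [get_sum,
    pvTable_eq min_value a m n (x1 + k - 1) (y1 + k - 1) hm hn (by omega) (by omega) (by omega) (by omega),
    pvTable_eq min_value a m n (x1 - 1) (y1 + k - 1) hm hn (by omega) (by omega) (by omega) (by omega),
    pvTable_eq min_value a m n (x1 + k - 1) (y1 - 1) hm hn (by omega) (by omega) (by omega) (by omega),
    pvTable_eq min_value a m n (x1 - 1) (y1 - 1) hm hn (by omega) (by omega) (by omega) (by omega)]
  have hwin := pvWin_eq min_value a x1 y1 k hk (by omega) (by omega)
  rw [hwin]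
  have hiff := pvWin_iff min_value a x1 y1 k hk
  rw [Bool.eq_iff_iff, beq_iff_eq]
  exact hiff
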